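-- pv_equiv track=rewrite | github.com/chw0912/CodingTest | 프로그래머스/unrated/172927. 광물 캐기/광물 캐기.py | solution
-- ===== SOURCE A (Python) =====
-- def solution(picks, minerals):
--     answer = 0
--     arr = []
--     mineral=[0,0,0]
--     for i in range(len(minerals)):
--         if i % 5 == 0 and i != 0:
--             arr.append(mineral)
--             mineral=[0,0,0]
--         if minerals[i] == 'diamond':
--             mineral[0] += 1
--         elif minerals[i] == 'iron':
--             mineral[1] += 1
--         else:
--             mineral[2] += 1
--     if mineral != [0,0,0]:
--         arr.append(mineral)
--
--     arr = arr[:sum(picks)]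
--
--     arr = sorted(arr, reverse=True)
--
--     for i in range(len(arr)):
--         if picks[0] != 0:
--             picks[0] -= 1
--             answer += sum(arr[0])*1
--             arr.remove(arr[0])
--         elif picks[1] != 0:
--             picks[1] -= 1
--             answer += arr[0][0]*5 + arr[0][1]*1 + arr[0][2]*1
--             arr.remove(arr[0])
--         elif picks[2] != 0:
--             picks[2] -= 1
--             answer += arr[0][0]*25 + arr[0][1]*5 + arr[0][2]*1
--             arr.remove(arr[0])
--
--     return answer
-- ===== SOURCE B (Python) =====
-- def solution(picks, minerals):
--     # Chunk minerals into groups of 5 by slicing (no per-element i%5 state machine),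
--     # then consume the sorted groups with remaining-pick counters instead of
--     # repeated list.remove.  Does NOT mutate picks (A decrements picks in place).
--     groups = []
--     for s in range(0, len(minerals), 5):
--         chunk = minerals[s:s + 5]
--         d = sum(1 for m in chunk if m == 'diamond')
--         r = sum(1 for m in chunk if m == 'iron')
--         groups.append((d, r, len(chunk) - d - r))
--     groups = groups[:sum(picks)]
--     groups.sort(reverse=True)
--     rem = [picks[0], picks[1], picks[2]]
--     answer = 0
--     for g in groups:
--         if rem[0] != 0:
--             rem[0] -= 1
--             answer += g[0] + g[1] + g[2]
--         elif rem[1] != 0: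
--             rem[1] -= 1
--             answer += 5 * g[0] + g[1] + g[2]
--         elif rem[2] != 0:
--             rem[2] -= 1
--             answer += 25 * g[0] + 5 * g[1] + g[2]
--         else:
--             break
--     return answer
-- ===== Notes on version B (the rewrite author's own statement) =====
-- stated objective: faster
-- what changed: B builds the [diamond,iron,other] group counts by slicing minerals into chunks of 5 (instead of A's per-index i%5 state machine) and consumes the sorted groups in one pass with remaining-pick counters and an early break, removing A's repeated arr.remove(arr[0]) scan; B also does not mutate picks (A decrements picks in place).
-- outside the precondition, e.g. on solution([], []): A returns 0, B raises IndexError; on solution([2], ['stone']): A returns 1, B raises IndexError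
import Mathlib
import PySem

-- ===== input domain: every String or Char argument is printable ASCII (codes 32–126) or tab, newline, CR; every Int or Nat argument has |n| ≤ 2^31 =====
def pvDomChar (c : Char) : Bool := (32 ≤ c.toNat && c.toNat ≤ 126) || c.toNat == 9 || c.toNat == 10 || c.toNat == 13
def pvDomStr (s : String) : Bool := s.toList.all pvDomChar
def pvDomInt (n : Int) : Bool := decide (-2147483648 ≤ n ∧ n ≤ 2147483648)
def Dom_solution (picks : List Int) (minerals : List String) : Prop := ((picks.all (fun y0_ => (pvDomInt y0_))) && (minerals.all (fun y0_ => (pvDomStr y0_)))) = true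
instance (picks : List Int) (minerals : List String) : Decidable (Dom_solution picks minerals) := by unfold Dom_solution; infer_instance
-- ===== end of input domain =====

-- B replaces A's per-index i%5 state machine and its quadratic remove-the-head loop by
-- slice-chunking plus a single pass over the sorted groups with remaining-pick counters
-- (objective: faster).  Python A mutates its `picks` argument in place (picks[i] -= 1);
-- the equivalence proved here is about the RETURN value only (B does not mutate picks).


-- ===== PORT A =====
-- A-side helper: body of A's first loop (for i in range(len(minerals))):
-- flush the running 5-counter `mineral` into arr at every 5th index, then count minerals[i]
def aCount (minerals : List String) (st : List (Int × Int × Int) × (Int × Int × Int)) (i : Int) :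
    List (Int × Int × Int) × (Int × Int × Int) :=
  let p := if PySem.Int.mod i 5 = 0 ∧ i ≠ 0 then (st.1 ++ [st.2], ((0 : Int), (0 : Int), (0 : Int))) else st
  let s := PySem.List.pyGetD minerals i ""
  if s = "diamond" then (p.1, (p.2.1 + 1, p.2.2.1, p.2.2.2))
  else if s = "iron" then (p.1, (p.2.1, p.2.2.1 + 1, p.2.2.2))
  else (p.1, (p.2.1, p.2.2.1, p.2.2.2 + 1))

-- A-side helper: A's first loop plus the trailing `if mineral != [0,0,0]: arr.append(mineral)`
def aGroups (minerals : List String) : List (Int × Int × Int) :=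
  let st := (PySem.List.pyRange 0 (minerals.length : Int) 1).foldl (aCount minerals) ([], (0, 0, 0))
  if st.2 ≠ ((0 : Int), (0 : Int), (0 : Int)) then st.1 ++ [st.2] else st.1

-- A-side helper: body of A's mining loop (state: answer, picks, arr).
-- arr.remove(arr[0]) removes the first occurrence of arr[0], i.e. the head: ported as .tail
def aMine (st : Int × List Int × List (Int × Int × Int)) (_i : Int) :
    Int × List Int × List (Int × Int × Int) :=
  if PySem.List.pyGetD st.2.1 0 0 ≠ 0 then
    let g := PySem.List.pyGetD st.2.2 0 ((0 : Int), (0 : Int), (0 : Int))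
    (st.1 + (g.1 + g.2.1 + g.2.2) * 1,
     PySem.List.pySetD st.2.1 0 (PySem.List.pyGetD st.2.1 0 0 - 1), st.2.2.tail)
  else if PySem.List.pyGetD st.2.1 1 0 ≠ 0 then
    let g := PySem.List.pyGetD st.2.2 0 ((0 : Int), (0 : Int), (0 : Int))
    (st.1 + (g.1 * 5 + g.2.1 * 1 + g.2.2 * 1),
     PySem.List.pySetD st.2.1 1 (PySem.List.pyGetD st.2.1 1 0 - 1), st.2.2.tail)
  else if PySem.List.pyGetD st.2.1 2 0 ≠ 0 then
    let g := PySem.List.pyGetD st.2.2 0 ((0 : Int), (0 : Int), (0 : Int))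
    (st.1 + (g.1 * 25 + g.2.1 * 5 + g.2.2 * 1),
     PySem.List.pySetD st.2.1 2 (PySem.List.pyGetD st.2.1 2 0 - 1), st.2.2.tail)
  else st

-- sorted(arr, reverse=True) compares the [d, i, s] triples lexicographically; every
-- component is a count out of a chunk of at most 5 minerals (so 0..5 < 6), hence the
-- injective base-6 key d*36 + i*6 + s realises exactly that order (both ports use it)
def solution (picks : List Int) (minerals : List String) : Int :=
  let arr := PySem.List.sorted (PySem.List.slice (aGroups minerals) none (some picks.sum))
      (fun g => g.1 * 36 + g.2.1 * 6 + g.2.2) true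
  ((PySem.List.pyRange 0 (arr.length : Int) 1).foldl aMine (0, picks, arr)).1

-- ===== PORT B =====
-- B-side helper: body of B's chunking loop (for s in range(0, len(minerals), 5))
def bChunk (minerals : List String) (gs : List (Int × Int × Int)) (s : Int) :
    List (Int × Int × Int) :=
  let chunk := PySem.List.slice minerals (some s) (some (s + 5))
  let d := (chunk.map (fun m => if m = "diamond" then (1 : Int) else 0)).sum
  let r := (chunk.map (fun m => if m = "iron" then (1 : Int) else 0)).sum
  gs ++ [(d, r, (chunk.length : Int) - d - r)]

def bGroups (minerals : List String) : List (Int × Int × Int) :=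
  (PySem.List.pyRange 0 (minerals.length : Int) 5).foldl (bChunk minerals) []

-- B-side helper: B's `for g in groups` loop with its break
def altConsume : List (Int × Int × Int) → Int → Int → Int → Int → Int
  | [], ans, _, _, _ => ans
  | g :: t, ans, r0, r1, r2 =>
    if r0 ≠ 0 then altConsume t (ans + (g.1 + g.2.1 + g.2.2)) (r0 - 1) r1 r2
    else if r1 ≠ 0 then altConsume t (ans + (5 * g.1 + g.2.1 + g.2.2)) r0 (r1 - 1) r2
    else if r2 ≠ 0 then altConsume t (ans + (25 * g.1 + 5 * g.2.1 + g.2.2)) r0 r1 (r2 - 1)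
    else ans

def solution_alt (picks : List Int) (minerals : List String) : Int :=
  let groups := PySem.List.sorted (PySem.List.slice (bGroups minerals) none (some picks.sum))
      (fun g => g.1 * 36 + g.2.1 * 6 + g.2.2) true
  altConsume groups 0 (PySem.List.pyGetD picks 0 0) (PySem.List.pyGetD picks 1 0)
    (PySem.List.pyGetD picks 2 0)

-- ===== PRECONDITION & SPEC =====
-- The task's natural domain has exactly three pick counts [diamond, iron, stone]; with
-- fewer than 3 picks A raises IndexError whenever the loop reaches picks[1] or picks[2]
-- (and B raises IndexError reading picks[0..2] up front), so Pre_ restricts to ≥ 3 picks;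
-- this also excludes short-picks inputs on which A happens to return (e.g. no groups).
def Pre_solution (picks : List Int) (minerals : List String) : Prop := 3 ≤ picks.length
instance (picks : List Int) (minerals : List String) : Decidable (Pre_solution picks minerals) := by unfold Pre_solution; infer_instance
def pvWitness_solution : List Int × List String := ([1, 1, 1], ["diamond", "stone", "iron", "stone", "stone", "diamond"])
def Spec_solution (picks : List Int) (minerals : List String) (out : Int) : Prop := out = solution_alt picks minerals
instance (picks : List Int) (minerals : List String) (out : Int) : Decidable (Spec_solution picks minerals out) := by unfold Spec_solution; infer_instance

-- ===== CLAIM (what is proved, stated in full; the proofs are below) =====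
def Claim_equal_solution : Prop := ∀ (picks : List Int) (minerals : List String), Dom_solution picks minerals → Pre_solution picks minerals → Spec_solution picks minerals (solution picks minerals)

-- ===== LEMMAS AND PROOFS =====

-- counting one mineral into the running [diamond, iron, other] triple (A's if/elif/else)
def cntStep (m : Int × Int × Int) (s : String) : Int × Int × Int :=
  if s = "diamond" then (m.1 + 1, m.2.1, m.2.2)
  else if s = "iron" then (m.1, m.2.1 + 1, m.2.2)
  else (m.1, m.2.1, m.2.2 + 1)

def cnt (ys : List String) : Int × Int × Int := ys.foldl cntStep (0, 0, 0)

-- A's first loop as structural recursion over the minerals with a Nat position counter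
def goA : List String → Nat → List (Int × Int × Int) × (Int × Int × Int) →
    List (Int × Int × Int) × (Int × Int × Int)
  | [], _, st => st
  | x :: xs, k, st =>
    let p := if k % 5 = 0 ∧ k ≠ 0 then (st.1 ++ [st.2], ((0 : Int), (0 : Int), (0 : Int))) else st
    goA xs (k + 1) (p.1, cntStep p.2 x)

def finishA (st : List (Int × Int × Int) × (Int × Int × Int)) : List (Int × Int × Int) :=
  if st.2 ≠ ((0 : Int), (0 : Int), (0 : Int)) then st.1 ++ [st.2] else st.1

-- the common shape both group-builders are proved equal to: counts of the chunks of 5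
def chunkList (xs : List String) : List (Int × Int × Int) :=
  if h : xs = [] then [] else cnt (xs.take 5) :: chunkList (xs.drop 5)
termination_by xs.length
decreasing_by
  have : 0 < xs.length := List.length_pos_iff.mpr h
  simp [List.length_drop]; omega


lemma goA_append : ∀ (a b : List String) (k : Nat)
    (st : List (Int × Int × Int) × (Int × Int × Int)),
    goA (a ++ b) k st = goA b (k + a.length) (goA a k st) := by
  intro a
  induction a with
  | nil => intro b k st; simp [goA]
  | cons x a ih =>
    intro b k st
    simp only [List.cons_append, goA, List.length_cons]
    rw [ih]
    rw [show k + 1 + a.length = k + (a.length + 1) by omega]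

lemma chunkList_nil : chunkList [] = [] := by
  rw [chunkList]
  simp

lemma chunkList_cons_eq (xs : List String) (h : xs ≠ []) :
    chunkList xs = cnt (xs.take 5) :: chunkList (xs.drop 5) := by
  rw [chunkList, dif_neg h]

lemma bridgeA (ms : List String) : ∀ (tl : List String) (k : Nat)
    (st : List (Int × Int × Int) × (Int × Int × Int)), ms.drop k = tl →
    (PySem.List.pyRange (k : Int) (ms.length : Int) 1).foldl (aCount ms) st = goA tl k st := by
  intro tl
  induction tl with
  | nil =>
    intro k st h
    have hk : ms.length ≤ k := List.drop_eq_nil_iff.mp h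
    rw [PySem.List.pyRange_one_eq_nil (by exact_mod_cast hk)]
    rfl
  | cons x tl ih =>
    intro k st h
    have hk : k < ms.length := by
      by_contra hc
      rw [List.drop_eq_nil_iff.mpr (by omega)] at h
      simp at h
    have hx : ms[k]? = some x := by
      have h0 : (List.drop k ms)[0]? = ms[k + 0]? := List.getElem?_drop
      rw [h] at h0
      simpa using h0.symm
    rw [PySem.List.pyRange_one_cons (by exact_mod_cast hk)]
    rw [List.foldl_cons]
    have hstep : aCount ms st (k : Int) =
        ((if k % 5 = 0 ∧ k ≠ 0 then (st.1 ++ [st.2], ((0 : Int), (0 : Int), (0 : Int))) else st).1,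
         cntStep (if k % 5 = 0 ∧ k ≠ 0 then (st.1 ++ [st.2], ((0 : Int), (0 : Int), (0 : Int))) else st).2 x) := by
      have h5 : PySem.Int.mod (k : Int) 5 = ((k % 5 : Nat) : Int) := by
        exact_mod_cast PySem.Int.mod_natCast k 5
      have hg : PySem.List.pyGetD ms (k : Int) "" = x := by
        rw [PySem.List.pyGetD_natCast, List.getD_eq_getElem?_getD, hx]
        rfl
      have hcond : (PySem.Int.mod (k : Int) 5 = 0 ∧ (k : Int) ≠ 0) ↔ (k % 5 = 0 ∧ k ≠ 0) := by
        rw [h5]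
        constructor <;> intro hc <;> exact ⟨by exact_mod_cast hc.1, by exact_mod_cast hc.2⟩
      unfold aCount cntStep
      rw [hg, if_congr hcond rfl rfl]
      split_ifs <;> simp_all
    rw [hstep]
    show _ = goA (x :: tl) k st
    unfold goA
    have hk1 : ((k : Int) + 1) = ((k + 1 : Nat) : Int) := by push_cast; ring
    rw [hk1]
    exact ih (k + 1) _ (by rw [← List.drop_drop, h]; rfl)

lemma goA_run : ∀ (ys : List String) (k : Nat)
    (st : List (Int × Int × Int) × (Int × Int × Int)),
    (∀ j, j < ys.length → ¬((k + j) % 5 = 0 ∧ k + j ≠ 0)) →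
    goA ys k st = (st.1, ys.foldl cntStep st.2) := by
  intro ys
  induction ys with
  | nil => intro k st _; rfl
  | cons x ys ih =>
    intro k st hnb
    have h0 : ¬(k % 5 = 0 ∧ k ≠ 0) := by
      have := hnb 0 (by simp)
      simpa using this
    unfold goA
    rw [if_neg h0]
    rw [ih (k + 1) (st.1, cntStep st.2 x) (by intro j hj; have := hnb (j + 1) (by simpa using hj); omega)]
    rfl

lemma cntStep_sum (m : Int × Int × Int) (s : String) :
    (cntStep m s).1 + (cntStep m s).2.1 + (cntStep m s).2.2 = m.1 + m.2.1 + m.2.2 + 1 := by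
  unfold cntStep
  split_ifs <;> simp <;> ring

lemma cnt_sum : ∀ (ys : List String) (m : Int × Int × Int),
    (ys.foldl cntStep m).1 + (ys.foldl cntStep m).2.1 + (ys.foldl cntStep m).2.2 =
      m.1 + m.2.1 + m.2.2 + ys.length := by
  intro ys
  induction ys with
  | nil => intro m; simp
  | cons x ys ih =>
    intro m
    rw [List.foldl_cons, ih, cntStep_sum]
    simp only [List.length_cons]
    push_cast
    ring

lemma cnt_ne_zero (ys : List String) (h : ys ≠ []) : cnt ys ≠ ((0 : Int), (0 : Int), (0 : Int)) := by
  intro hc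
  have hs := cnt_sum ys (0, 0, 0)
  rw [show ys.foldl cntStep (0, 0, 0) = cnt ys from rfl, hc] at hs
  have : 0 < ys.length := List.length_pos_iff.mpr h
  simp at hs
  omega

lemma goA_chunks : ∀ (n : Nat) (xs : List String) (q : Nat) (arr : List (Int × Int × Int))
    (m : Int × Int × Int), xs.length ≤ n → xs ≠ [] → 1 ≤ q →
    finishA (goA xs (5 * q) (arr, m)) = arr ++ m :: chunkList xs := by
  intro n
  induction n with
  | zero =>
    intro xs q arr m hn hne _
    exact absurd (List.eq_nil_of_length_eq_zero (by omega)) hne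
  | succ n ih =>
    intro xs q arr m hn hne hq
    obtain ⟨y, ys, rfl⟩ := List.exists_cons_of_ne_nil hne
    -- split off the first chunk
    have hsplit : y :: ys = (y :: ys).take 5 ++ (y :: ys).drop 5 := (List.take_append_drop 5 _).symm
    have hinner : goA (y :: ys) (5 * q) (arr, m) =
        goA ((y :: ys).drop 5) (5 * q + ((y :: ys).take 5).length)
          (arr ++ [m], cnt ((y :: ys).take 5)) := by
      conv_lhs => rw [hsplit]
      rw [goA_append]
      congr 1
      show goA (y :: ys.take 4) (5 * q) (arr, m) = _
      unfold goA
      rw [if_pos (by constructor <;> omega)]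
      rw [goA_run _ (5 * q + 1) _ (by intro j hj; have : j < 4 := lt_of_lt_of_le hj (by simpa using List.length_take_le 4 ys); omega)]
      simp [cnt, List.foldl_cons]
    by_cases hd : (y :: ys).drop 5 = []
    · rw [hinner, hd]
      show finishA (arr ++ [m], cnt ((y :: ys).take 5)) = _
      unfold finishA
      rw [if_pos (by simpa using cnt_ne_zero _ (by simp))]
      rw [chunkList_cons_eq _ (by simp), hd, chunkList_nil]
      simp
    · have hdl : 0 < ((y :: ys).drop 5).length := List.length_pos_iff.mpr hd
      rw [List.length_drop] at hdl
      have hlen5 : ((y :: ys).take 5).length = 5 := by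
        rw [List.length_take]
        omega
      rw [hinner, hlen5, show 5 * q + 5 = 5 * (q + 1) by ring]
      rw [ih _ (q + 1) _ _ (by
          rw [List.length_drop]
          simp only [List.length_cons] at hn ⊢
          omega) hd (by omega)]
      rw [chunkList_cons_eq (y :: ys) (by simp)]
      simp

lemma goA_top (xs : List String) :
    finishA (goA xs 0 ([], (0, 0, 0))) = chunkList xs := by
  by_cases hne : xs = []
  · subst hne
    rw [chunkList_nil]
    rfl
  · obtain ⟨y, ys, rfl⟩ := List.exists_cons_of_ne_nil hne
    have hsplit : y :: ys = (y :: ys).take 5 ++ (y :: ys).drop 5 := (List.take_append_drop 5 _).symm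
    have hinner : goA (y :: ys) 0 ([], (0, 0, 0)) =
        goA ((y :: ys).drop 5) (((y :: ys).take 5).length) ([], cnt ((y :: ys).take 5)) := by
      conv_lhs => rw [hsplit]
      rw [goA_append]
      congr 1
      · simp
      rw [goA_run _ 0 _ (by
        intro j hj
        have : j < 5 := lt_of_lt_of_le hj (by simpa using List.length_take_le 5 (y :: ys))
        omega)]
      rfl
    by_cases hd : (y :: ys).drop 5 = []
    · rw [hinner, hd]
      show finishA ([], cnt ((y :: ys).take 5)) = _
      unfold finishA
      rw [if_pos (by simpa using cnt_ne_zero _ (by simp))]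
      rw [chunkList_cons_eq _ (by simp), hd, chunkList_nil]
      simp
    · have hdl : 0 < ((y :: ys).drop 5).length := List.length_pos_iff.mpr hd
      rw [List.length_drop] at hdl
      have hlen5 : ((y :: ys).take 5).length = 5 := by
        rw [List.length_take]
        omega
      rw [hinner, hlen5, show (5 : Nat) = 5 * 1 by ring]
      rw [goA_chunks ((y :: ys).drop 5).length _ 1 _ _ le_rfl hd le_rfl]
      rw [chunkList_cons_eq (y :: ys) (by simp)]
      simp

lemma aGroups_eq (ms : List String) : aGroups ms = chunkList ms := by
  unfold aGroups
  have hb := bridgeA ms ms 0 ([], (0, 0, 0)) rfl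
  simp only [Nat.cast_zero] at hb
  rw [hb]
  exact goA_top ms

-- ===== B side =====

lemma pyRange5_nil (a b : Int) (h : b ≤ a) : PySem.List.pyRange a b 5 = [] := by
  rw [PySem.List.pyRange_of_pos a b (by norm_num)]
  rw [if_neg (by omega)]
  simp

lemma mapShift (a : Int) (N : Nat) :
    List.map ((fun k : Nat => a + 5 * (k : Int)) ∘ Nat.succ) (List.range N) =
      List.map (fun k : Nat => (a + 5) + 5 * (k : Int)) (List.range N) := by
  apply List.map_congr_left
  intro k _
  simp [Function.comp]
  push_cast
  ring

lemma pyRange5_cons (a b : Int) (h : a < b) :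
    PySem.List.pyRange a b 5 = a :: PySem.List.pyRange (a + 5) b 5 := by
  rw [PySem.List.pyRange_of_pos a b (by norm_num), PySem.List.pyRange_of_pos (a + 5) b (by norm_num)]
  rw [if_pos h]
  have hN : ((b - a + 5 - 1) / 5).toNat =
      (if a + 5 < b then ((b - (a + 5) + 5 - 1) / 5).toNat else 0) + 1 := by
    split_ifs <;> omega
  rw [hN, List.range_succ_eq_map]
  simp only [List.map_cons, List.map_map]
  rw [mapShift]
  congr 1
  simp

lemma cnt_counts : ∀ (ys : List String) (a b c : Int),
    ys.foldl cntStep (a, b, c) =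
      (a + (ys.map (fun m => if m = "diamond" then (1 : Int) else 0)).sum,
       b + (ys.map (fun m => if m = "iron" then (1 : Int) else 0)).sum,
       c + ((ys.length : Int) - (ys.map (fun m => if m = "diamond" then (1 : Int) else 0)).sum
         - (ys.map (fun m => if m = "iron" then (1 : Int) else 0)).sum)) := by
  intro ys
  induction ys with
  | nil => intro a b c; simp
  | cons x ys ih =>
    intro a b c
    rw [List.foldl_cons]
    by_cases hd : x = "diamond"
    · rw [show cntStep (a, b, c) x = (a + 1, b, c) by unfold cntStep; rw [if_pos hd]]
      rw [ih]
      simp [hd]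
      constructor
      · ring
      · push_cast; ring
    · by_cases hi : x = "iron"
      · rw [show cntStep (a, b, c) x = (a, b + 1, c) by unfold cntStep; rw [if_neg hd, if_pos hi]]
        rw [ih]
        simp [hd, hi]
        constructor
        · ring
        · push_cast; ring
      · rw [show cntStep (a, b, c) x = (a, b, c + 1) by unfold cntStep; rw [if_neg hd, if_neg hi]]
        rw [ih]
        simp [hd, hi]
        push_cast; ring

lemma bridgeB (ms : List String) : ∀ (n : Nat) (tl : List String) (k : Nat)
    (gs : List (Int × Int × Int)), tl.length ≤ n → ms.drop k = tl →
    (PySem.List.pyRange (k : Int) (ms.length : Int) 5).foldl (bChunk ms) gs = gs ++ chunkList tl := by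
  intro n
  induction n with
  | zero =>
    intro tl k gs hn h
    have : tl = [] := List.eq_nil_of_length_eq_zero (by omega)
    subst this
    have hk : ms.length ≤ k := List.drop_eq_nil_iff.mp h
    rw [pyRange5_nil _ _ (by exact_mod_cast hk), chunkList_nil]
    simp
  | succ n ih =>
    intro tl k gs hn h
    by_cases hne : tl = []
    · subst hne
      have hk : ms.length ≤ k := List.drop_eq_nil_iff.mp h
      rw [pyRange5_nil _ _ (by exact_mod_cast hk), chunkList_nil]
      simp
    · have hk : k < ms.length := by
        by_contra hc
        rw [List.drop_eq_nil_iff.mpr (by omega)] at h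
        exact hne h.symm
      rw [pyRange5_cons _ _ (by exact_mod_cast hk), List.foldl_cons]
      have hchunk : PySem.List.slice ms (some (k : Int)) (some ((k : Int) + 5)) = tl.take 5 := by
        have := PySem.List.slice_natCast_add ms k 5
        rw [show ((k : Int) + ((5 : Nat) : Int)) = (k : Int) + 5 by push_cast; ring] at this
        rw [this, h]
      have hbody : bChunk ms gs (k : Int) = gs ++ [cnt (tl.take 5)] := by
        unfold bChunk
        rw [hchunk]
        have := cnt_counts (tl.take 5) 0 0 0
        simp only [zero_add] at this
        rw [show cnt (tl.take 5) = (tl.take 5).foldl cntStep (0, 0, 0) from rfl, this]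
      rw [hbody]
      rw [show ((k : Int) + 5) = ((k + 5 : Nat) : Int) by push_cast; ring]
      rw [ih (tl.drop 5) (k + 5) _ (by
          have : 0 < tl.length := List.length_pos_iff.mpr hne
          simp [List.length_drop]; omega)
        (by rw [← List.drop_drop, h])]
      rw [chunkList_cons_eq _ hne]
      simp

lemma bGroups_eq (ms : List String) : bGroups ms = chunkList ms := by
  unfold bGroups
  have hb := bridgeB ms ms.length ms 0 [] le_rfl rfl
  simp only [Nat.cast_zero] at hb
  rw [hb]
  simp

-- ===== consumption loop =====

def aMineF (st : Int × List Int × List (Int × Int × Int)) : Int × List Int × List (Int × Int × Int) :=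
  aMine st 0

lemma foldl_const_iterate {α : Type} (F : α → Int → α) (f : α → α)
    (hF : ∀ st i, F st i = f st) : ∀ (l : List Int) (init : α),
    l.foldl F init = f^[l.length] init := by
  intro l
  induction l with
  | nil => intro init; rfl
  | cons x l ih =>
    intro init
    rw [List.foldl_cons, hF, ih, List.length_cons, ← Function.iterate_succ_apply]

lemma mine_eq : ∀ (a : List (Int × Int × Int)) (pk : List Int) (ans : Int), 3 ≤ pk.length →
    (aMineF^[a.length] (ans, pk, a)).1 =
      altConsume a ans (PySem.List.pyGetD pk 0 0) (PySem.List.pyGetD pk 1 0)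
        (PySem.List.pyGetD pk 2 0) := by
  intro a
  induction a with
  | nil => intro pk ans _; rfl
  | cons g t ih =>
    intro pk ans hpk
    by_cases h0 : PySem.List.pyGetD pk 0 0 ≠ 0
    · have hstep : aMineF (ans, pk, g :: t) =
          (ans + (g.1 + g.2.1 + g.2.2) * 1,
           PySem.List.pySetD pk 0 (PySem.List.pyGetD pk 0 0 - 1), t) := by
        unfold aMineF aMine
        rw [if_pos h0]
        simp [PySem.List.pyGetD_zero_cons]
      rw [List.length_cons, Function.iterate_succ_apply, hstep,
        ih _ _ (by rw [PySem.List.length_pySetD]; exact hpk)]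
      have e0 := PySem.List.pyGetD_pySetD_natCast pk 0 0 (PySem.List.pyGetD pk 0 0 - 1) 0 (by omega)
      have e1 := PySem.List.pyGetD_pySetD_natCast pk 0 1 (PySem.List.pyGetD pk 0 0 - 1) 0 (by omega)
      have e2 := PySem.List.pyGetD_pySetD_natCast pk 0 2 (PySem.List.pyGetD pk 0 0 - 1) 0 (by omega)
      norm_num at e0 e1 e2
      rw [e0, e1, e2]
      conv_rhs => rw [altConsume]
      rw [if_pos h0, show ans + (g.1 + g.2.1 + g.2.2) * 1 = ans + (g.1 + g.2.1 + g.2.2) by ring]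
    · push_neg at h0
      by_cases h1 : PySem.List.pyGetD pk 1 0 ≠ 0
      · have hstep : aMineF (ans, pk, g :: t) =
            (ans + (g.1 * 5 + g.2.1 * 1 + g.2.2 * 1),
             PySem.List.pySetD pk 1 (PySem.List.pyGetD pk 1 0 - 1), t) := by
          unfold aMineF aMine
          rw [if_neg (by simpa using h0), if_pos h1]
          simp [PySem.List.pyGetD_zero_cons]
        rw [List.length_cons, Function.iterate_succ_apply, hstep,
          ih _ _ (by rw [PySem.List.length_pySetD]; exact hpk)]
        have e0 := PySem.List.pyGetD_pySetD_natCast pk 1 0 (PySem.List.pyGetD pk 1 0 - 1) 0 (by omega)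
        have e1 := PySem.List.pyGetD_pySetD_natCast pk 1 1 (PySem.List.pyGetD pk 1 0 - 1) 0 (by omega)
        have e2 := PySem.List.pyGetD_pySetD_natCast pk 1 2 (PySem.List.pyGetD pk 1 0 - 1) 0 (by omega)
        norm_num at e0 e1 e2
        rw [e0, e1, e2]
        conv_rhs => rw [altConsume]
        rw [if_neg (by simpa using h0), if_pos h1,
          show ans + (g.1 * 5 + g.2.1 * 1 + g.2.2 * 1) = ans + (5 * g.1 + g.2.1 + g.2.2) by ring, h0]
      · push_neg at h1
        by_cases h2 : PySem.List.pyGetD pk 2 0 ≠ 0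
        · have hstep : aMineF (ans, pk, g :: t) =
              (ans + (g.1 * 25 + g.2.1 * 5 + g.2.2 * 1),
               PySem.List.pySetD pk 2 (PySem.List.pyGetD pk 2 0 - 1), t) := by
            unfold aMineF aMine
            rw [if_neg (by simpa using h0), if_neg (by simpa using h1), if_pos h2]
            simp [PySem.List.pyGetD_zero_cons]
          rw [List.length_cons, Function.iterate_succ_apply, hstep,
            ih _ _ (by rw [PySem.List.length_pySetD]; exact hpk)]
          have e0 := PySem.List.pyGetD_pySetD_natCast pk 2 0 (PySem.List.pyGetD pk 2 0 - 1) 0 (by omega)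
          have e1 := PySem.List.pyGetD_pySetD_natCast pk 2 1 (PySem.List.pyGetD pk 2 0 - 1) 0 (by omega)
          have e2 := PySem.List.pyGetD_pySetD_natCast pk 2 2 (PySem.List.pyGetD pk 2 0 - 1) 0 (by omega)
          norm_num at e0 e1 e2
          rw [e0, e1, e2]
          conv_rhs => rw [altConsume]
          rw [if_neg (by simpa using h0), if_neg (by simpa using h1), if_pos h2,
            show ans + (g.1 * 25 + g.2.1 * 5 + g.2.2 * 1) = ans + (25 * g.1 + 5 * g.2.1 + g.2.2) by ring,
            h0, h1]
        · push_neg at h2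
          have hfix : aMineF (ans, pk, g :: t) = (ans, pk, g :: t) := by
            unfold aMineF aMine
            rw [if_neg (by simpa using h0), if_neg (by simpa using h1), if_neg (by simpa using h2)]
          rw [Function.iterate_fixed hfix]
          show ans = _
          conv_rhs => rw [altConsume]
          rw [if_neg (by simpa using h0), if_neg (by simpa using h1), if_neg (by simpa using h2)]

-- ===== VERDICT (by name: the statement is the Claim_ definition above) =====
theorem solution_spec : Claim_equal_solution := by
  intro picks minerals _ hpre
  unfold Spec_solution
  simp only [solution, solution_alt]
  rw [aGroups_eq, bGroups_eq]
  have hF : ∀ (st : Int × List Int × List (Int × Int × Int)) (i : Int), aMine st i = aMineF st := by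
    intro st i; rfl
  rw [foldl_const_iterate aMine aMineF hF]
  rw [PySem.List.length_pyRange_one]
  simp only [sub_zero, Int.toNat_natCast]
  exact mine_eq _ picks 0 hpre
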